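-- pv_equiv track=rewrite | github.com/emiliawisnios/Machine_Learning_Masters | Natural_Language_Processing/practical_1/practical_1.py | distinct_words
-- ===== SOURCE A (Python) =====
-- def distinct_words(corpus):
--     """ Determine a list of distinct words for the corpus.
--         Params:
--             corpus (list of list of strings): corpus of documents
--         Return:
--             corpus_words (list of strings): list of distinct words across the
--             corpus, sorted (using python 'sorted' function)
--             num_corpus_words (integer): number of distinct words across the
--             corpus
--     """
--     corpus_words = []
--     num_corpus_words = -1
--
--     # ------------------
--     # Write your implementation here.
--     for text in corpus:
--         for word in text:
--             corpus_words.append(word)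
--     corpus_words = sorted(list(set(corpus_words)))
--     num_corpus_words = len(corpus_words)
--     # ------------------
--
--     return corpus_words, num_corpus_words
-- ===== SOURCE B (Python) =====
-- def distinct_words(corpus):
--     """Sort the flattened corpus once, then dedup adjacent duplicates in one scan."""
--     words = sorted(w for text in corpus for w in text)
--     corpus_words = []
--     prev = None
--     for w in words:
--         if prev is None or w != prev:
--             corpus_words.append(w)
--             prev = w
--     return corpus_words, len(corpus_words)
-- ===== Notes on version B (the rewrite author's own statement) =====
-- stated objective: alternative
-- what changed: Replaces A's hash-set dedup followed by sorting with sorting the full word list first and removing adjacent duplicates in a single linear scan.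
import Mathlib
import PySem

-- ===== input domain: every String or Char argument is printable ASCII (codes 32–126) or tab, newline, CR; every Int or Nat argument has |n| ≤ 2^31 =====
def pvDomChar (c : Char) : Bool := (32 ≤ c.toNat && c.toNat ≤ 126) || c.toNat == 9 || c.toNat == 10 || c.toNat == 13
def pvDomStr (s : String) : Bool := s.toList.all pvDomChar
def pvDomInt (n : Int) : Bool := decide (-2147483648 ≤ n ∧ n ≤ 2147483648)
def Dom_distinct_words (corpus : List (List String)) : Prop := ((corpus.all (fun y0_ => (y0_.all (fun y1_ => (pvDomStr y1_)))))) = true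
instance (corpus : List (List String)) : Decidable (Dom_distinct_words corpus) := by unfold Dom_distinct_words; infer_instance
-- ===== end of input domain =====

-- B replaces A's set-dedup-then-sort with sort-all-words-then-adjacent-dedup scan (alternative algorithm, same cost).

-- ===== PORT A =====
-- corpus_words = []; for text in corpus: for word in text: corpus_words.append(word)
-- corpus_words = sorted(list(set(corpus_words))); return corpus_words, len(corpus_words)
def distinct_words (corpus : List (List String)) : List String × Int :=
  let corpus_words : List String :=
    corpus.foldl (fun acc text => text.foldl (fun acc word => acc ++ [word]) acc) []
  let corpus_words := PySem.List.sorted (PySem.Set.ofList corpus_words) (fun x => x) false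
  (corpus_words, (corpus_words.length : Int))

-- ===== PORT B =====
-- the loop 'for w in words: if prev is None or w != prev: append w; prev = w'
def pvDedupGo (prev : Option String) : List String → List String
  | [] => []
  | w :: ws =>
    if prev = none ∨ prev ≠ some w then w :: pvDedupGo (some w) ws
    else pvDedupGo prev ws

def distinct_words_alt (corpus : List (List String)) : List String × Int :=
  let words := PySem.List.sorted (corpus.flatMap (fun text => text)) (fun x => x) false
  let corpus_words := pvDedupGo none words
  (corpus_words, (corpus_words.length : Int))

-- ===== PRECONDITION & SPEC =====
def Spec_distinct_words (corpus : List (List String)) (out : List String × Int) : Prop := out = distinct_words_alt corpus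
instance (corpus : List (List String)) (out : List String × Int) : Decidable (Spec_distinct_words corpus out) := by unfold Spec_distinct_words; infer_instance

-- ===== CLAIM (what is proved, stated in full; the proofs are below) =====
def Claim_equal_distinct_words : Prop := ∀ (corpus : List (List String)), Dom_distinct_words corpus → Spec_distinct_words corpus (distinct_words corpus)

-- ===== LEMMAS AND PROOFS =====

-- A's nested append loops flatten the corpus
theorem pv_flatten_eq (corpus : List (List String)) (acc : List String) :
    corpus.foldl (fun acc text => text.foldl (fun acc word => acc ++ [word]) acc) acc
      = acc ++ corpus.flatMap (fun text => text) := by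
  induction corpus generalizing acc with
  | nil => simp
  | cons t ts ih =>
    have inner : ∀ (t : List String) (a : List String),
        t.foldl (fun acc word => acc ++ [word]) a = a ++ t := by
      intro t
      induction t with
      | nil => simp
      | cons x xs ihx => intro a; simp [List.foldl, ihx]
    rw [List.foldl_cons, ih, inner, List.flatMap_cons, List.append_assoc]

-- the scan with prev = some p: keeps exactly the elements ≠ p, strictly increasing
theorem pv_go_spec (p : String) (zs : List String)
    (hz : zs.Pairwise (· ≤ ·)) (hp : ∀ y ∈ zs, p ≤ y) :
    (∀ x, x ∈ pvDedupGo (some p) zs ↔ x ∈ zs ∧ x ≠ p) ∧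
    (p :: pvDedupGo (some p) zs).Pairwise (· < ·) := by
  induction zs generalizing p with
  | nil => simp [pvDedupGo]
  | cons w ws ih =>
    have hz1 : ∀ y ∈ ws, w ≤ y := (List.pairwise_cons.mp hz).1
    have hz2 : ws.Pairwise (· ≤ ·) := (List.pairwise_cons.mp hz).2
    have hpw : p ≤ w := hp w (by simp)
    by_cases hwp : w = p
    · subst hwp
      have h := ih w hz2 hz1
      have step : pvDedupGo (some w) (w :: ws) = pvDedupGo (some w) ws := by
        simp [pvDedupGo]
      constructor
      · intro x
        rw [step, h.1 x]
        constructor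
        · rintro ⟨hx, hne⟩; exact ⟨by simp [hx], hne⟩
        · rintro ⟨hx, hne⟩
          rcases List.mem_cons.mp hx with h1 | h1
          · exact absurd h1 hne
          · exact ⟨h1, hne⟩
      · rw [step]; exact h.2
    · have hlt : p < w := lt_of_le_of_ne hpw (fun h => hwp h.symm)
      have h := ih w hz2 hz1
      have step : pvDedupGo (some p) (w :: ws) = w :: pvDedupGo (some w) ws := by
        simp [pvDedupGo, Ne.symm hwp]
      constructor
      · intro x
        rw [step]
        simp only [List.mem_cons]
        constructor
        · rintro (rfl | hx)
          · exact ⟨Or.inl rfl, fun h => hwp h⟩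
          · have := (h.1 x).mp hx
            refine ⟨Or.inr this.1, ?_⟩
            have : w ≤ x := hz1 x this.1
            exact fun h => absurd (h ▸ this) (not_le_of_gt hlt)
        · rintro ⟨hx, hne⟩
          rcases hx with rfl | hx
          · exact Or.inl rfl
          · by_cases hxw : x = w
            · exact Or.inl hxw
            · exact Or.inr ((h.1 x).mpr ⟨hx, hxw⟩)
      · rw [step]
        refine List.pairwise_cons.mpr ⟨?_, h.2⟩
        intro y hy
        rcases List.mem_cons.mp hy with rfl | hy
        · exact hlt
        · have := (h.1 y).mp hy
          exact lt_of_lt_of_le hlt (hz1 y this.1)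

theorem pv_dedup_spec (zs : List String) (hz : zs.Pairwise (· ≤ ·)) :
    (∀ x, x ∈ pvDedupGo none zs ↔ x ∈ zs) ∧ (pvDedupGo none zs).Pairwise (· < ·) := by
  cases zs with
  | nil => simp [pvDedupGo]
  | cons w ws =>
    have hz1 : ∀ y ∈ ws, w ≤ y := (List.pairwise_cons.mp hz).1
    have hz2 : ws.Pairwise (· ≤ ·) := (List.pairwise_cons.mp hz).2
    have h := pv_go_spec w ws hz2 hz1
    have step : pvDedupGo none (w :: ws) = w :: pvDedupGo (some w) ws := by
      simp [pvDedupGo]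
    constructor
    · intro x
      rw [step]
      simp only [List.mem_cons]
      constructor
      · rintro (rfl | hx)
        · exact Or.inl rfl
        · exact Or.inr ((h.1 x).mp hx).1
      · rintro (rfl | hx)
        · exact Or.inl rfl
        · by_cases hxw : x = w
          · exact Or.inl hxw
          · exact Or.inr ((h.1 x).mpr ⟨hx, hxw⟩)
    · rw [step]; exact h.2

-- ===== VERDICT (by name: the statement is the Claim_ definition above) =====
theorem distinct_words_spec : Claim_equal_distinct_words := by
  intro corpus _
  unfold Spec_distinct_words distinct_words distinct_words_alt
  set ws := corpus.flatMap (fun text => text) with hws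
  have hflat := pv_flatten_eq corpus []
  rw [List.nil_append] at hflat
  rw [hflat]
  set zs := PySem.List.sorted ws (fun x => x) false with hzs
  have hsorted : zs.Pairwise (· ≤ ·) := PySem.List.sorted_pairwise ws (fun x => x)
  have h := pv_dedup_spec zs hsorted
  set ys := pvDedupGo none zs with hys
  have hynd : ys.Nodup := h.2.imp (fun h => ne_of_lt h)
  have hperm : ys.Perm (PySem.Set.ofList ws) := by
    rw [List.perm_ext_iff_of_nodup hynd (PySem.Set.nodup_ofList ws)]
    intro a
    rw [h.1 a, PySem.Set.mem_ofList, hzs, PySem.List.mem_sorted]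
  have : PySem.List.sorted (PySem.Set.ofList ws) (fun x => x) false = ys :=
    PySem.List.sorted_eq_of_perm_of_pairwise_lt _ _ _ hperm h.2
  simp only [Prod.mk.injEq]
  exact ⟨this, by rw [this]⟩
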